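-- pv_equiv track=rewrite | github.com/UTHSCSA-NAL/explainable_and_fair_ML_for_ADRD | viz_utils.py | group_feature_indices
-- ===== SOURCE A (Python) =====
-- def group_feature_indices(feature_labels):
--     """
--     Group feature indices into Ventricles, White Matter, Gray Matter,
--     and further into gray matter subgroups based on keywords.
--
--     Returns:
--       main_groups (dict): e.g., {"Ventricles": [...], "White Matter": [...]}
--       gm_subgroups (dict): e.g., {"Subcortical": [...], "Frontal": [...], ... , "Other": [...]}
--     """
--     ventricles = [i for i, label in enumerate(feature_labels) if '-VN' in label]
--     white_matter = [i for i, label in enumerate(feature_labels) if '-WM' in label]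
--     gray_matter = [i for i, label in enumerate(feature_labels) if '-GM' in label]
--
--     gm_keywords = {
--         "Subcortical": ["Accumbens", "Amygdala", "Caudate", "Hippocampus", "Pallidum", "Putamen", "Thalamus", "Basal Forebrain"],
--         "Frontal": ["Frontal", "Cingulate", "Insula", "Operc", "Gyrus Rectus", "Precentral", "Postcentral"],
--         "Temporal": ["Temporal", "Planum Temp"],
--         "Parietal_Cerebellum": ["Parietal", "Precuneus", "Supramarginal", "Cerebellum"],
--         "Occipital": ["Occipital", "Calcarine", "Cuneus", "Lingual", "Fusiform", "Occipital Pole"]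
--     }
--     gm_subgroups = {key: [] for key in gm_keywords.keys()}
--     gm_subgroups["Other"] = []
--
--     for i in gray_matter:
--         label = feature_labels[i]
--         assigned = False
--         for subgroup, keywords in gm_keywords.items():
--             if any(keyword in label for keyword in keywords):
--                 gm_subgroups[subgroup].append(i)
--                 assigned = True
--                 break
--         if not assigned:
--             gm_subgroups["Other"].append(i)
--
--     main_groups = {
--         "Ventricles": ventricles,
--         "White Matter": white_matter,
--     }
--     return main_groups, gm_subgroups
-- ===== SOURCE B (Python) =====
-- def group_feature_indices(feature_labels):
--     """Sieve algorithm: iterate the SUBGROUPS on the outside, each round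
--     partitioning the remaining gray-matter labels into this subgroup and a
--     rest list; whatever survives every round is 'Other'."""
--     gm_keywords = {
--         "Subcortical": ["Accumbens", "Amygdala", "Caudate", "Hippocampus", "Pallidum", "Putamen", "Thalamus", "Basal Forebrain"],
--         "Frontal": ["Frontal", "Cingulate", "Insula", "Operc", "Gyrus Rectus", "Precentral", "Postcentral"],
--         "Temporal": ["Temporal", "Planum Temp"],
--         "Parietal_Cerebellum": ["Parietal", "Precuneus", "Supramarginal", "Cerebellum"],
--         "Occipital": ["Occipital", "Calcarine", "Cuneus", "Lingual", "Fusiform", "Occipital Pole"]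
--     }
--     ventricles = [i for i, l in enumerate(feature_labels) if '-VN' in l]
--     white_matter = [i for i, l in enumerate(feature_labels) if '-WM' in l]
--     remaining = [(i, l) for i, l in enumerate(feature_labels) if '-GM' in l]
--     gm_subgroups = {}
--     for subgroup, keywords in gm_keywords.items():
--         picked, rest = [], []
--         for i, l in remaining:
--             if any(kw in l for kw in keywords):
--                 picked.append(i)
--             else:
--                 rest.append((i, l))
--         gm_subgroups[subgroup] = picked
--         remaining = rest
--     gm_subgroups["Other"] = [i for i, _ in remaining]
--     return {"Ventricles": ventricles, "White Matter": white_matter}, gm_subgroups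
-- ===== Notes on version B (the rewrite author's own statement) =====
-- stated objective: alternative
-- what changed: Gray-matter classification is transposed into a sieve: B iterates the five subgroups on the outside and each round partitions the remaining gray-matter labels into that subgroup and a rest list (leftovers become 'Other'), instead of A's per-label scan over the keyword dict with a flag-and-break inner loop.
import Mathlib
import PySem

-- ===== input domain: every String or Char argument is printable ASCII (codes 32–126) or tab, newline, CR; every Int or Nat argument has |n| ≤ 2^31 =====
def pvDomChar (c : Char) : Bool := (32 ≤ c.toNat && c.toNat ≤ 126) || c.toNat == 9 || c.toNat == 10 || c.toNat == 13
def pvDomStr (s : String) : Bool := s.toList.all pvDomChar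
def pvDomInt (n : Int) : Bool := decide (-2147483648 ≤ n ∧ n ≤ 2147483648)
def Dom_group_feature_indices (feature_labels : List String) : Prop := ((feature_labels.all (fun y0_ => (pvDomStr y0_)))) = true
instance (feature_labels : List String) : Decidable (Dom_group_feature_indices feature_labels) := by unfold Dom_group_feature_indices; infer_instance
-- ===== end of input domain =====

-- B transposes the gray-matter classification into a sieve over the subgroups
-- (each round partitions the remaining labels) instead of A's per-label scan of
-- the keyword dict (objective: alternative, same cost).

-- ===== PORT A =====
-- the gm_keywords dict literal (insertion order), shared data of both sources
def gmKeywords : List (String × List String) :=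
  [("Subcortical", ["Accumbens", "Amygdala", "Caudate", "Hippocampus", "Pallidum", "Putamen", "Thalamus", "Basal Forebrain"]),
   ("Frontal", ["Frontal", "Cingulate", "Insula", "Operc", "Gyrus Rectus", "Precentral", "Postcentral"]),
   ("Temporal", ["Temporal", "Planum Temp"]),
   ("Parietal_Cerebellum", ["Parietal", "Precuneus", "Supramarginal", "Cerebellum"]),
   ("Occipital", ["Occipital", "Calcarine", "Cuneus", "Lingual", "Fusiform", "Occipital Pole"])]

-- gm_subgroups[subgroup].append(i): exact, since every key used is present and keys are unique
def appendAt (d : List (String × List Int)) (k : String) (i : Int) : List (String × List Int) :=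
  d.map (fun q => if q.1 == k then (q.1, q.2 ++ [i]) else q)

-- A's inner 'for subgroup, keywords in gm_keywords.items(): if any(...): ...; break' with the assigned flag
def findSubgroupA : List (String × List String) → String → Option String
  | [], _ => none
  | (sg, kws) :: rest, label =>
    if kws.any (fun kw => PySem.Str.isIn kw label) then some sg else findSubgroupA rest label

def group_feature_indices (feature_labels : List String) : (List (String × List Int)) × (List (String × List Int)) :=
  let en := PySem.List.enumerate feature_labels
  let ventricles := (en.filter (fun p => PySem.Str.isIn "-VN" p.2)).map (·.1)
  let white_matter := (en.filter (fun p => PySem.Str.isIn "-WM" p.2)).map (·.1)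
  let gray_matter := (en.filter (fun p => PySem.Str.isIn "-GM" p.2)).map (·.1)
  let gm0 : List (String × List Int) := gmKeywords.map (fun q => (q.1, [])) ++ [("Other", [])]
  let gm := gray_matter.foldl (fun d i =>
      match PySem.List.pyGet? feature_labels i with  -- label = feature_labels[i]; none unreachable (i from enumerate)
      | some label =>
          match findSubgroupA gmKeywords label with
          | some sg => appendAt d sg i
          | none => appendAt d "Other" i
      | none => d) gm0
  ([("Ventricles", ventricles), ("White Matter", white_matter)], gm)

-- ===== PORT B =====
-- any(kw in l for kw in keywords)
def matchesKw (kws : List String) (l : String) : Bool := kws.any (fun kw => PySem.Str.isIn kw l)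

-- one round of Source B's sieve: the inner loop partitioning 'remaining' into picked indices and rest pairs
def sieveRound (rem : List (Int × String)) (kws : List String) : List Int × List (Int × String) :=
  rem.foldl (fun pr p =>
    if matchesKw kws p.2 then (pr.1 ++ [p.1], pr.2) else (pr.1, pr.2 ++ [p])) ([], [])

-- Source B's outer loop over gm_keywords.items(), building gm_subgroups in insertion order, then 'Other'
def sieve : List (String × List String) → List (Int × String) → List (String × List Int)
  | [], rem => [("Other", rem.map (·.1))]
  | q :: rest, rem =>
    let pr := sieveRound rem q.2
    (q.1, pr.1) :: sieve rest pr.2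

def group_feature_indices_alt (feature_labels : List String) : (List (String × List Int)) × (List (String × List Int)) :=
  let en := PySem.List.enumerate feature_labels
  let ventricles := (en.filter (fun p => PySem.Str.isIn "-VN" p.2)).map (·.1)
  let white_matter := (en.filter (fun p => PySem.Str.isIn "-WM" p.2)).map (·.1)
  let remaining := en.filter (fun p => PySem.Str.isIn "-GM" p.2)
  ([("Ventricles", ventricles), ("White Matter", white_matter)], sieve gmKeywords remaining)

-- ===== PRECONDITION & SPEC =====
def Spec_group_feature_indices (feature_labels : List String) (out : (List (String × List Int)) × (List (String × List Int))) : Prop := out = group_feature_indices_alt feature_labels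
instance (feature_labels : List String) (out : (List (String × List Int)) × (List (String × List Int))) : Decidable (Spec_group_feature_indices feature_labels out) := by unfold Spec_group_feature_indices; infer_instance

-- ===== CLAIM (what is proved, stated in full; the proofs are below) =====
def Claim_equal_group_feature_indices : Prop := ∀ (feature_labels : List String), Dom_group_feature_indices feature_labels → Spec_group_feature_indices feature_labels (group_feature_indices feature_labels)

-- ===== LEMMAS AND PROOFS =====

-- first matching subgroup name of L, if any (proof-side characterisation shared by both sides)
def clsOpt (L : List (String × List String)) (l : String) : Option String :=
  (L.find? (fun q => matchesKw q.2 l)).map (·.1)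

theorem findSubgroupA_eq_clsOpt (L : List (String × List String)) (label : String) :
    findSubgroupA L label = clsOpt L label := by
  induction L with
  | nil => rfl
  | cons q rest ih =>
    obtain ⟨sg, kws⟩ := q
    cases h : (kws.any fun kw => PySem.Str.isIn kw label) with
    | true => simp only [findSubgroupA, h, if_true, clsOpt, List.find?_cons, matchesKw]; rfl
    | false =>
      simp only [findSubgroupA, h, Bool.false_eq_true, if_false, clsOpt, List.find?_cons,
        matchesKw]
      exact ih

theorem clsOpt_mem (L : List (String × List String)) (l : String) (k : String)
    (h : clsOpt L l = some k) : k ∈ L.map (·.1) := by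
  unfold clsOpt at h
  cases hf : L.find? (fun q => matchesKw q.2 l) with
  | none => rw [hf] at h; simp at h
  | some q =>
    rw [hf] at h
    simp only [Option.map_some, Option.some.injEq] at h
    subst h
    exact List.mem_map_of_mem (List.mem_of_find?_eq_some hf)

-- the inner partition loop computed as two filters
theorem sieveRound_eq (kws : List String) (rem : List (Int × String)) :
    sieveRound rem kws =
      ((rem.filter (fun p => matchesKw kws p.2)).map (·.1),
       rem.filter (fun p => ¬ matchesKw kws p.2)) := by
  unfold sieveRound
  suffices h : ∀ (a : List Int) (b : List (Int × String)),
      rem.foldl (fun pr p =>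
        if matchesKw kws p.2 then (pr.1 ++ [p.1], pr.2) else (pr.1, pr.2 ++ [p])) (a, b) =
      (a ++ (rem.filter (fun p => matchesKw kws p.2)).map (·.1),
       b ++ rem.filter (fun p => ¬ matchesKw kws p.2)) by
    simpa using h [] []
  induction rem with
  | nil => intro a b; simp
  | cons p ps ih =>
    intro a b
    simp only [List.foldl_cons, List.filter_cons]
    by_cases h : matchesKw kws p.2 = true <;> simp [h, ih]

-- the sieve computed as first-match filters over the untouched remaining list
theorem sieve_eq (L : List (String × List String)) (rem : List (Int × String))
    (hnd : (L.map (·.1)).Nodup) :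
    sieve L rem =
      L.map (fun q => (q.1, (rem.filter (fun p => clsOpt L p.2 == some q.1)).map (·.1)))
      ++ [("Other", (rem.filter (fun p => (clsOpt L p.2).isNone)).map (·.1))] := by
  induction L generalizing rem with
  | nil => simp [sieve, clsOpt, List.filter_eq_self.mpr]
  | cons q rest ih =>
    obtain ⟨sg, kws⟩ := q
    have hsg : sg ∉ rest.map (·.1) := by
      simpa using (List.nodup_cons.mp hnd).1
    have hcons : ∀ (l : String), clsOpt ((sg, kws) :: rest) l =
        if matchesKw kws l then some sg else clsOpt rest l := by
      intro l
      unfold clsOpt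
      rw [List.find?_cons]
      split <;> simp_all
    simp only [sieve, sieveRound_eq]
    rw [ih _ (List.nodup_cons.mp hnd).2]
    simp only [List.map_cons, List.cons_append, List.filter_filter]
    refine congrArg₂ (· :: ·) ?_ (congrArg₂ (· ++ ·) ?_ ?_)
    · -- head entry
      refine congrArg (fun z => (sg, z.map (fun x : Int × String => x.1))) (List.filter_congr ?_)
      intro p _
      rw [hcons]
      by_cases h : matchesKw kws p.2 = true
      · simp [h]
      · cases hc : clsOpt rest p.2 with
        | none => simp [h]
        | some k =>
          have hk : k ≠ sg := fun he => hsg (he ▸ clsOpt_mem rest p.2 k hc)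
          simp [h, hk]
    · -- tail entries
      refine List.map_congr_left ?_
      intro q' hq'
      have hne : q'.1 ≠ sg := fun he => hsg (he ▸ List.mem_map_of_mem hq')
      refine congrArg (fun z => (q'.1, z.map (fun x : Int × String => x.1))) (List.filter_congr ?_)
      intro p _
      rw [hcons]
      by_cases h : matchesKw kws p.2 = true
      · simp [h, Ne.symm hne]
      · simp [h]
    · -- the Other entry
      refine congrArg (fun z => [("Other", z.map (fun x : Int × String => x.1))]) (List.filter_congr ?_)
      intro p _
      rw [hcons]
      by_cases h : matchesKw kws p.2 = true <;> simp [h]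

-- A's per-label assignment as a total classifier
def classifyA (l : String) : String := (clsOpt gmKeywords l).getD "Other"

-- A's loop body rewritten through classifyA
theorem body_eq (d : List (String × List Int)) (label : String) (i : Int) :
    (match findSubgroupA gmKeywords label with
     | some sg => appendAt d sg i
     | none => appendAt d "Other" i) = appendAt d (classifyA label) i := by
  rw [findSubgroupA_eq_clsOpt]
  unfold classifyA
  cases clsOpt gmKeywords label <;> rfl

-- A's grouping fold, solved into per-key filters
theorem foldl_appendAt (f : Int × String → String) (ps : List (Int × String)) :
    ∀ (ks : List String) (acc : String → List Int),
    ps.foldl (fun d p => appendAt d (f p) p.1) (ks.map (fun k => (k, acc k))) =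
      ks.map (fun k => (k, acc k ++ (ps.filter (fun p => f p == k)).map (·.1))) := by
  induction ps with
  | nil => intro ks acc; simp
  | cons p ps ih =>
    intro ks acc
    have h1 : appendAt (ks.map (fun k => (k, acc k))) (f p) p.1 =
        ks.map (fun k => (k, if k == f p then acc k ++ [p.1] else acc k)) := by
      unfold appendAt
      rw [List.map_map]
      refine List.map_congr_left ?_
      intro k _
      simp only [Function.comp]
      by_cases h : k = f p
      · simp [h]
      · simp [h]
    simp only [List.foldl_cons, h1, ih]
    refine List.map_congr_left ?_
    intro k _
    simp only [List.filter_cons]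
    by_cases h : f p = k
    · simp [h, List.append_assoc]
    · simp [h, Ne.symm h]

theorem pyGet?_of_mem_enumerate {α : Type} (xs : List α) (p : Int × α)
    (h : p ∈ PySem.List.enumerate xs 0) : PySem.List.pyGet? xs p.1 = some p.2 := by
  rw [List.mem_iff_getElem?] at h
  obtain ⟨k, hk⟩ := h
  rw [PySem.List.getElem?_enumerate] at hk
  cases hx : xs[k]? with
  | none => rw [hx] at hk; simp at hk
  | some x =>
    rw [hx] at hk
    simp only [Option.map_some, Option.some.injEq] at hk
    subst hk
    simp [PySem.List.pyGet?_natCast, hx]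

-- key facts about the literal keyword table
theorem gm_nodup : (gmKeywords.map (·.1)).Nodup := by decide
theorem gm_no_other : "Other" ∉ gmKeywords.map (·.1) := by decide

-- ===== VERDICT (by name: the statement is the Claim_ definition above) =====
theorem group_feature_indices_spec : Claim_equal_group_feature_indices := by
  intro feature_labels _
  unfold Spec_group_feature_indices group_feature_indices group_feature_indices_alt
  refine congrArg _ ?_
  -- rewrite A's fold over indices as a fold over the (index, label) pairs
  set gray := (PySem.List.enumerate feature_labels).filter
      (fun p => PySem.Str.isIn "-GM" p.2) with hgray
  have hA : (gray.map (·.1)).foldl (fun d i =>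
      match PySem.List.pyGet? feature_labels i with
      | some label =>
          match findSubgroupA gmKeywords label with
          | some sg => appendAt d sg i
          | none => appendAt d "Other" i
      | none => d) (gmKeywords.map (fun q => (q.1, [])) ++ [("Other", [])]) =
      gray.foldl (fun d p => appendAt d (classifyA p.2) p.1)
        (gmKeywords.map (fun q => (q.1, [])) ++ [("Other", [])]) := by
    rw [List.foldl_map]
    apply PySem.List.foldl_congr_mem
    intro d p hp
    have hpe : p ∈ PySem.List.enumerate feature_labels 0 := (List.mem_filter.mp hp).1
    rw [pyGet?_of_mem_enumerate feature_labels p hpe]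
    exact body_eq d p.2 p.1
  rw [hA]
  have hinit : gmKeywords.map (fun q => (q.1, ([] : List Int))) ++ [("Other", [])] =
      (gmKeywords.map (·.1) ++ ["Other"]).map (fun k => (k, ([] : List Int))) := by
    simp [List.map_map]
  rw [hinit, foldl_appendAt (fun p => classifyA p.2) gray]
  rw [sieve_eq gmKeywords gray gm_nodup]
  rw [List.map_append, List.map_map]
  refine congrArg₂ _ (List.map_congr_left ?_) ?_
  · intro q hq
    simp only [Function.comp]
    have hq1 : q.1 ≠ "Other" := fun he => gm_no_other (he ▸ List.mem_map_of_mem hq)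
    rw [List.nil_append]
    refine congrArg (fun z => (q.1, z.map (fun x : Int × String => x.1))) (List.filter_congr ?_)
    intro p _
    unfold classifyA
    cases hc : clsOpt gmKeywords p.2 with
    | none => simp [Ne.symm hq1]
    | some k => simp
  · simp only [List.map_cons, List.map_nil, List.nil_append]
    refine congrArg (fun z => [("Other", z.map (fun x : Int × String => x.1))]) (List.filter_congr ?_)
    intro p _
    unfold classifyA
    cases hc : clsOpt gmKeywords p.2 with
    | none => simp
    | some k =>
      have hk : k ≠ "Other" := fun he => gm_no_other (he ▸ clsOpt_mem gmKeywords p.2 k hc)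
      simp [hk]
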